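-- pv_equiv track=rewrite | github.com/BrentChesny/AdventOfCode | 2019/day-12/solution.py | find_repetition_dimension
-- ===== SOURCE A (Python) =====
-- def step_dimension(positions, velocities):
--     new_positions = positions[:]
--     new_velocities = velocities[:]
--
--     for i in range(len(positions)):
--         vxi = velocities[i]
--         xi = positions[i]
--
--         for j in range(len(positions)):
--             if i != j:
--                 xj = positions[j]
--
--                 vxi += -1 if xi > xj else 1 if xi < xj else 0
--
--         new_velocities[i] = vxi
--         new_positions[i] = xi + vxi
--
--     return new_positions, new_velocities
--
-- def find_repetition_dimension(starting_positions):
--     positions = starting_positions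
--     velocities = [0 for p in positions]
--     seen = set()
--     step_count = 0
--
--     while (tuple(positions), tuple(velocities)) not in seen:
--         seen.add((tuple(positions), tuple(velocities)))
--         positions, velocities = step_dimension(positions, velocities)
--         step_count += 1
--
--     return step_count
-- ===== SOURCE B (Python) =====
-- def _step(positions, velocities):
--     # one sorted pass: first[v] = #elements < v, last[v] = #elements <= v
--     n = len(positions)
--     first = {}
--     last = {}
--     for i, v in enumerate(sorted(positions)):
--         if v not in first:
--             first[v] = i
--         last[v] = i + 1
--     velocities = [v + ((n - last[p]) - first[p])
--                   for p, v in zip(positions, velocities)]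
--     positions = [p + v for p, v in zip(positions, velocities)]
--     return positions, velocities
--
--
-- def find_repetition_dimension(starting_positions):
--     # Floyd's tortoise-and-hare cycle detection: the step map is invertible,
--     # so the orbit is a pure cycle and the hare first catches the tortoise
--     # after exactly one period.
--     tortoise = _step(list(starting_positions), [0] * len(starting_positions))
--     hare = _step(*tortoise)
--     count = 1
--     while tortoise != hare:
--         tortoise = _step(*tortoise)
--         hare = _step(*_step(*hare))
--         count += 1
--     return count
-- ===== Notes on version B (the rewrite author's own statement) =====
-- stated objective: alternative
-- what changed: B replaces A's grow-a-set-of-visited-states search with Floyd's tortoise-and-hare cycle detection (two states marched at speeds 1 and 2 until they coincide; correct because the step map is invertible, so the orbit is a pure cycle and the hare first catches the tortoise after exactly one period), and computes each step's velocity deltas in one sorted pass with first/last-occurrence dicts (delta = #greater - #less) instead of A's nested O(n^2) pairwise loops.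
import Mathlib
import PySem

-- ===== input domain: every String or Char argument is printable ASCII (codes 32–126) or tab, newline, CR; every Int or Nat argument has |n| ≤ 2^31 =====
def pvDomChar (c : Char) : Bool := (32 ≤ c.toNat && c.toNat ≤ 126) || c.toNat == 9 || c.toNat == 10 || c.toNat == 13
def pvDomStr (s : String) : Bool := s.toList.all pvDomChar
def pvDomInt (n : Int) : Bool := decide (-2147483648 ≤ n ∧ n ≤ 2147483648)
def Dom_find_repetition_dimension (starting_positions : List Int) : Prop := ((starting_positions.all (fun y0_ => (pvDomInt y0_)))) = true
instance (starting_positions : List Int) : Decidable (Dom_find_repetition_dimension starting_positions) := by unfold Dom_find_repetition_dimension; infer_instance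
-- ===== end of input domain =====

-- B replaces A's growing `seen` set with Floyd's tortoise-and-hare cycle detection (two
-- states marched at speeds 1 and 2 until they coincide); since the step map is invertible
-- the orbit is a pure cycle and the hare first catches the tortoise after one period.
-- Both while-loops are made total with a fuel bound (~2^32) each port carries itself; the
-- proof shows the two loops return the same count for EVERY fuel, so the guard is inessential.

-- ===== PORT A =====
def stepA (positions velocities : List Int) : List Int × List Int :=
  (List.range positions.length).foldl
    (fun (st : List Int × List Int) i =>
      let vxi0 := velocities.getD i 0
      let xi := positions.getD i 0
      let vxi := (List.range positions.length).foldl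
        (fun vxi j =>
          if i ≠ j then
            let xj := positions.getD j 0
            vxi + (if xi > xj then -1 else if xi < xj then 1 else 0)
          else vxi)
        vxi0
      (st.1.set i (xi + vxi), st.2.set i vxi))
    (positions, velocities)

def loopA : Nat → (List Int × List Int) → Std.HashSet (List Int × List Int) → Int → Int
  | 0, _, _, c => c
  | f+1, st, seen, c =>
    if st ∈ seen then c
    else loopA f (stepA st.1 st.2) (seen.insert st) (c + 1)

def find_repetition_dimension (starting_positions : List Int) : Int :=
  loopA 4294967296 (starting_positions, starting_positions.map (fun _ => (0 : Int)))
    Std.HashSet.emptyWithCapacity 0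

-- ===== PORT B =====
-- one sorted pass per step: first[v] = #elements < v (index of first occurrence),
-- last[v] = #elements <= v (index after last occurrence); Python's first[p]/last[p]
-- lookups never miss (p is in positions), so getD's default 0 is never used
def flOf (sp : List Int) : PySem.Dict Int Int × PySem.Dict Int Int :=
  (PySem.List.enumerate sp 0).foldl
    (fun fl iv =>
      (if fl.1.contains iv.2 then fl.1 else fl.1.insert iv.2 iv.1,
       fl.2.insert iv.2 (iv.1 + 1)))
    (PySem.Dict.empty, PySem.Dict.empty)

def stepB (positions velocities : List Int) : List Int × List Int :=
  let n : Int := positions.length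
  let d := flOf (PySem.List.sorted positions (fun x => x) false)
  let vels := (positions.zip velocities).map
    (fun pv => pv.2 + ((n - d.2.getD pv.1 0) - d.1.getD pv.1 0))
  let poss := (positions.zip vels).map (fun pv => pv.1 + pv.2)
  (poss, vels)

def loopB : Nat → (List Int × List Int) → (List Int × List Int) → Int → Int
  | 0, _, _, c => c
  | f+1, tor, hare, c =>
    if tor = hare then c
    else loopB f (stepB tor.1 tor.2)
      (stepB (stepB hare.1 hare.2).1 (stepB hare.1 hare.2).2) (c + 1)

def find_repetition_dimension_alt (starting_positions : List Int) : Int :=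
  let tor := stepB starting_positions (starting_positions.map (fun _ => (0 : Int)))
  let hare := stepB tor.1 tor.2
  loopB 4294967295 tor hare 1

-- ===== PRECONDITION & SPEC =====
def Spec_find_repetition_dimension (starting_positions : List Int) (out : Int) : Prop := out = find_repetition_dimension_alt starting_positions
instance (starting_positions : List Int) (out : Int) : Decidable (Spec_find_repetition_dimension starting_positions out) := by unfold Spec_find_repetition_dimension; infer_instance

-- ===== CLAIM (what is proved, stated in full; the proofs are below) =====
def Claim_equal_find_repetition_dimension : Prop := ∀ (starting_positions : List Int), Dom_find_repetition_dimension starting_positions → Spec_find_repetition_dimension starting_positions (find_repetition_dimension starting_positions)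

-- ===== LEMMAS AND PROOFS =====

-- the per-element velocity delta B computes from its two dicts
def eDelta (ps : List Int) (x : Int) : Int :=
  let d := flOf (PySem.List.sorted ps (fun x => x) false)
  ((ps.length : Int) - d.2.getD x 0) - d.1.getD x 0

-- the same delta as a signed comparison sum (A's inner loop computes this)
def accB (positions : List Int) (p : Int) : Int :=
  (positions.map (fun q => (if p < q then (1 : Int) else 0) - (if p > q then 1 else 0))).sum

def flF (l : List Int) (s : Int) (d : PySem.Dict Int Int × PySem.Dict Int Int) :
    PySem.Dict Int Int × PySem.Dict Int Int :=
  (PySem.List.enumerate l s).foldl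
    (fun fl iv =>
      (if fl.1.contains iv.2 then fl.1 else fl.1.insert iv.2 iv.1,
       fl.2.insert iv.2 (iv.1 + 1)))
    d

theorem flF_nil (s : Int) (d : PySem.Dict Int Int × PySem.Dict Int Int) : flF [] s d = d := rfl

theorem flF_cons (x : Int) (t : List Int) (s : Int) (d : PySem.Dict Int Int × PySem.Dict Int Int) :
    flF (x :: t) s d
      = flF t (s + 1)
          (if d.1.contains x then d.1 else d.1.insert x s, d.2.insert x (s + 1)) := by
  simp [flF, PySem.List.enumerate_cons]

theorem flOf_eq_flF (sp : List Int) : flOf sp = flF sp 0 (PySem.Dict.empty, PySem.Dict.empty) := rfl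

theorem flF_not_mem (l : List Int) (v : Int) (hv : v ∉ l) :
    ∀ (s : Int) (d : PySem.Dict Int Int × PySem.Dict Int Int),
      (flF l s d).1.getD v 0 = d.1.getD v 0 ∧ (flF l s d).2.getD v 0 = d.2.getD v 0 := by
  induction l with
  | nil => intro s d; simp [flF_nil]
  | cons x t ih =>
    intro s d
    have hvx : v ≠ x := fun h => hv (h ▸ List.mem_cons_self ..)
    have hvt : v ∉ t := fun h => hv (List.mem_cons_of_mem _ h)
    rw [flF_cons]
    obtain ⟨h1, h2⟩ := ih hvt (s + 1) _
    refine ⟨?_, ?_⟩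
    · rw [h1]
      by_cases hc : d.1.contains x
      · simp [hc]
      · simp [hc, PySem.Dict.getD_insert, hvx]
    · rw [h2]
      simp [PySem.Dict.getD_insert, hvx]

theorem flF_contained (l : List Int) (v : Int) :
    ∀ (s : Int) (d : PySem.Dict Int Int × PySem.Dict Int Int),
      d.1.contains v = true → (flF l s d).1.getD v 0 = d.1.getD v 0 := by
  induction l with
  | nil => intro s d _; rfl
  | cons x t ih =>
    intro s d hc
    rw [flF_cons]
    by_cases hcx : d.1.contains x
    · rw [ih (s + 1) _ (by simpa [hcx] using hc)]
      simp [hcx]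
    · have hvx : v ≠ x := fun h => hcx (h ▸ hc)
      rw [ih (s + 1) _ (by simp [hcx, PySem.Dict.contains_insert, hc])]
      simp [hcx, PySem.Dict.getD_insert, hvx]

theorem flF_first (l : List Int) (hs : l.Pairwise (· ≤ ·)) (v : Int) (hv : v ∈ l) :
    ∀ (s : Int) (d : PySem.Dict Int Int × PySem.Dict Int Int),
      d.1.contains v = false →
      (flF l s d).1.getD v 0 = s + (l.countP (fun q => decide (q < v)) : Int) := by
  induction l with
  | nil => cases hv
  | cons x t ih =>
    intro s d hc
    obtain ⟨hx, ht⟩ := List.pairwise_cons.mp hs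
    rw [flF_cons]
    by_cases hvx : v = x
    · subst hvx
      have hc1 : ((if d.1.contains v then d.1 else d.1.insert v s).contains v) = true := by
        simp [hc, PySem.Dict.contains_insert]
      rw [flF_contained t v (s + 1) _ hc1]
      have hcnt : (v :: t).countP (fun q => decide (q < v)) = 0 := by
        rw [List.countP_eq_zero]
        intro q hq
        rcases List.mem_cons.mp hq with h | h
        · subst h; simp
        · have := hx q h; simp; omega
      simp [hc, PySem.Dict.getD_insert, hcnt]
    · rcases List.mem_cons.mp hv with h | hvt
      · exact absurd h hvx
      have hxv : x < v := lt_of_le_of_ne (hx v hvt) (fun h => hvx h.symm)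
      have hc' : ((if d.1.contains x then d.1 else d.1.insert x s).contains v) = false := by
        by_cases hcx : d.1.contains x
        · simpa [hcx] using hc
        · simp [hcx, PySem.Dict.contains_insert, hc]
          intro h; omega
      rw [ih ht hvt (s + 1) _ hc']
      have : (x :: t).countP (fun q => decide (q < v))
          = t.countP (fun q => decide (q < v)) + 1 := by
        rw [List.countP_cons]
        simp [hxv]
      rw [this]
      push_cast
      ring

theorem flF_last (l : List Int) (hs : l.Pairwise (· ≤ ·)) (v : Int) (hv : v ∈ l) :
    ∀ (s : Int) (d : PySem.Dict Int Int × PySem.Dict Int Int),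
      (flF l s d).2.getD v 0 = s + (l.countP (fun q => decide (q ≤ v)) : Int) := by
  induction l with
  | nil => cases hv
  | cons x t ih =>
    intro s d
    obtain ⟨hx, ht⟩ := List.pairwise_cons.mp hs
    rw [flF_cons]
    by_cases hvt : v ∈ t
    · rw [ih ht hvt (s + 1) _]
      have hxv : x ≤ v := hx v hvt
      have : (x :: t).countP (fun q => decide (q ≤ v))
          = t.countP (fun q => decide (q ≤ v)) + 1 := by
        rw [List.countP_cons]; simp [hxv]
      rw [this]; push_cast; ring
    · have hvx : v = x := by
        rcases List.mem_cons.mp hv with h | h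
        · exact h
        · exact absurd h hvt
      subst hvx
      obtain ⟨_, h2⟩ := flF_not_mem t v hvt (s + 1) _
      rw [h2]
      have hcnt : t.countP (fun q => decide (q ≤ v)) = 0 := by
        rw [List.countP_eq_zero]
        intro q hq
        have h1 := hx q hq
        have : q ≠ v := fun h => hvt (h ▸ hq)
        simp; omega
      have : (v :: t).countP (fun q => decide (q ≤ v)) = 1 := by
        rw [List.countP_cons, hcnt]; simp
      rw [this]
      simp [PySem.Dict.getD_insert]

theorem accB_eq_countP (ps : List Int) (x : Int) :
    accB ps x = (ps.countP (fun q => decide (x < q)) : Int)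
      - (ps.countP (fun q => decide (q < x)) : Int) := by
  induction ps with
  | nil => simp [accB]
  | cons y t ih =>
    simp only [accB, List.map_cons, List.sum_cons] at ih ⊢
    rw [List.countP_cons, List.countP_cons, ih]
    push_cast
    simp only [decide_eq_true_eq]
    split_ifs <;> omega

theorem eDelta_eq_accB (ps : List Int) (x : Int) (hx : x ∈ ps) : eDelta ps x = accB ps x := by
  have hperm := PySem.List.sorted_perm ps (fun x => x) false
  have hpw : (PySem.List.sorted ps (fun x => x) false).Pairwise (· ≤ ·) := by
    simpa using PySem.List.sorted_pairwise ps (fun x => x)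
  have hxs : x ∈ PySem.List.sorted ps (fun x => x) false := hperm.mem_iff.mpr hx
  have hce : (PySem.Dict.empty : PySem.Dict Int Int).contains x = false := by
    simp [PySem.Dict.empty, PySem.Dict.contains]
  have hfirst := flF_first _ hpw x hxs 0 (PySem.Dict.empty, PySem.Dict.empty) hce
  have hlast := flF_last _ hpw x hxs 0 (PySem.Dict.empty, PySem.Dict.empty)
  have hclt := hperm.countP_eq (fun q => decide (q < x))
  have hcle := hperm.countP_eq (fun q => decide (q ≤ x))
  have hsplit : ∀ (t : List Int),
      t.countP (fun q => decide (q ≤ x)) + t.countP (fun q => decide (x < q)) = t.length := by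
    intro t
    induction t with
    | nil => simp
    | cons y u ih2 =>
      rw [List.countP_cons, List.countP_cons, List.length_cons]
      by_cases h : y ≤ x
      · rw [if_pos (by simpa using h), if_neg (by simp; omega)]
        omega
      · rw [if_neg (by simpa using h), if_pos (by simp; omega)]
        omega
  have hs2 := hsplit ps
  simp only [eDelta, flOf_eq_flF]
  rw [hfirst, hlast, accB_eq_countP, hclt, hcle]
  omega

def step1 (st : List Int × List Int) : List Int × List Int := stepB st.1 st.2

def orbit (xs : List Int) (k : Nat) : List Int × List Int :=
  step1^[k] (xs, xs.map (fun _ => (0 : Int)))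

def goodS (st : List Int × List Int) : Prop := st.2.length = st.1.length

theorem stepB_len2 (p v : List Int) (h : v.length = p.length) :
    (stepB p v).2.length = p.length := by
  simp [stepB, h]

theorem stepB_len1 (p v : List Int) (h : v.length = p.length) :
    (stepB p v).1.length = p.length := by
  simp [stepB, h]

theorem stepB_get2 (p v : List Int) (h : v.length = p.length) (i : Nat) (hi : i < p.length) :
    ((stepB p v).2)[i]'(by rw [stepB_len2 p v h]; exact hi) =
      v[i]'(by omega) + eDelta p (p[i]'hi) := by
  simp [stepB, eDelta]

theorem stepB_get1 (p v : List Int) (h : v.length = p.length) (i : Nat) (hi : i < p.length) :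
    ((stepB p v).1)[i]'(by rw [stepB_len1 p v h]; exact hi) =
      p[i]'hi + ((stepB p v).2)[i]'(by rw [stepB_len2 p v h]; exact hi) := by
  simp [stepB]

theorem stepB_inj (p v q w : List Int) (hv : v.length = p.length) (hw : w.length = q.length)
    (h : stepB p v = stepB q w) : p = q ∧ v = w := by
  have hlen : p.length = q.length := by
    have := congrArg (fun r => r.1.length) h
    simpa [stepB_len1 p v hv, stepB_len1 q w hw] using this
  have hp : p = q := by
    apply List.ext_getElem hlen
    intro i hi hi'
    have h1 := stepB_get1 p v hv i hi
    have h1' := stepB_get1 q w hw i hi'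
    have e1 : ((stepB p v).1)[i]'(by rw [stepB_len1 p v hv]; exact hi)
        = ((stepB q w).1)[i]'(by rw [stepB_len1 q w hw]; exact hi') := by
      congr 1 <;> rw [h]
    have e2 : ((stepB p v).2)[i]'(by rw [stepB_len2 p v hv]; exact hi)
        = ((stepB q w).2)[i]'(by rw [stepB_len2 q w hw]; exact hi') := by
      congr 1 <;> rw [h]
    omega
  subst hp
  refine ⟨rfl, ?_⟩
  apply List.ext_getElem (by omega)
  intro i hi hi'
  have h2 := stepB_get2 p v hv i (by omega)
  have h2' := stepB_get2 p w hw i (by omega)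
  have e2 : ((stepB p v).2)[i]'(by rw [stepB_len2 p v hv]; omega)
      = ((stepB p w).2)[i]'(by rw [stepB_len2 p w hw]; omega) := by
    congr 1 <;> rw [h]
  omega

theorem step1_good (s : List Int × List Int) (hs : goodS s) : goodS (step1 s) := by
  obtain ⟨p, v⟩ := s
  simp only [goodS] at hs ⊢
  simp only [step1]
  rw [stepB_len1 p v hs, stepB_len2 p v hs]

theorem step1_iter_good (s : List Int × List Int) (hs : goodS s) (a : Nat) :
    goodS (step1^[a] s) := by
  induction a with
  | zero => simpa using hs
  | succ a ih => rw [Function.iterate_succ_apply']; exact step1_good _ ih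

theorem step1_inj (s t : List Int × List Int) (hs : goodS s) (ht : goodS t)
    (h : step1 s = step1 t) : s = t := by
  obtain ⟨p, v⟩ := s
  obtain ⟨q, w⟩ := t
  simp only [goodS] at hs ht
  obtain ⟨h1, h2⟩ := stepB_inj p v q w hs ht h
  simp [h1, h2]

theorem step1_iter_inj (a : Nat) (s t : List Int × List Int) (hs : goodS s) (ht : goodS t)
    (h : step1^[a] s = step1^[a] t) : s = t := by
  induction a with
  | zero => simpa using h
  | succ a ih =>
    apply ih
    simp only [Function.iterate_succ_apply'] at h
    exact step1_inj _ _ (step1_iter_good s hs a) (step1_iter_good t ht a) h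

theorem orbit_good (xs : List Int) (k : Nat) : goodS (orbit xs k) := by
  apply step1_iter_good
  simp [goodS]

theorem orbit_shift (xs : List Int) (j k : Nat) (h : j ≤ k) :
    orbit xs k = step1^[j] (orbit xs (k - j)) := by
  simp only [orbit, ← Function.iterate_add_apply]
  congr 1
  omega

theorem repeat_to_zero (xs : List Int) (j k : Nat) (hj : j ≤ k)
    (h : orbit xs j = orbit xs k) : orbit xs 0 = orbit xs (k - j) := by
  have h1 : orbit xs j = step1^[j] (orbit xs 0) := by
    simpa using orbit_shift xs j j le_rfl
  have h2 : orbit xs k = step1^[j] (orbit xs (k - j)) := orbit_shift xs j k hj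
  exact step1_iter_inj j _ _ (orbit_good xs 0) (orbit_good xs (k - j)) (by rw [← h1, ← h2]; exact h)

-- stepA = stepB: inner loop first
theorem map_getD_range {α β : Type} [Inhabited α] (l : List α) (d : α) (f : α → β) :
    (List.range l.length).map (fun j => f (l.getD j d)) = l.map f := by
  apply List.ext_getElem (by simp)
  intro i hi hi'
  simp only [List.getElem_map, List.getElem_range]
  rw [List.getD_eq_getElem l d (by simpa using hi)]

theorem inner_eq (p : List Int) (i : Nat) (hi : i < p.length) (a : Int) :
    (List.range p.length).foldl
      (fun vxi j =>
        if i ≠ j then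
          vxi + (if p.getD i 0 > p.getD j 0 then -1 else if p.getD i 0 < p.getD j 0 then 1 else 0)
        else vxi) a
    = a + accB p (p.getD i 0) := by
  set xi := p.getD i 0 with hxi
  have hcongr : (List.range p.length).foldl
      (fun vxi j =>
        if i ≠ j then vxi + (if xi > p.getD j 0 then -1 else if xi < p.getD j 0 then 1 else 0)
        else vxi) a
      = (List.range p.length).foldl
      (fun vxi j =>
        vxi + (if i = j then 0 else (if xi > p.getD j 0 then -1 else if xi < p.getD j 0 then 1 else 0))) a := by
    apply PySem.List.foldl_congr_mem
    intro acc j _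
    by_cases hij : i = j <;> simp [hij]
  rw [hcongr, PySem.List.foldl_add]
  congr 1
  have hmap : (List.range p.length).map
      (fun j => if i = j then 0 else (if xi > p.getD j 0 then (-1 : Int) else if xi < p.getD j 0 then 1 else 0))
      = (List.range p.length).map
      (fun j => (if xi < p.getD j 0 then (1 : Int) else 0) - (if xi > p.getD j 0 then 1 else 0)) := by
    have hsign : ∀ x y : Int, (if x > y then (-1 : Int) else if x < y then 1 else 0)
        = (if x < y then 1 else 0) - (if x > y then 1 else 0) := by
      intro x y
      split_ifs <;> omega
    apply List.map_congr_left
    intro j hj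
    by_cases hij : i = j
    · subst hij
      rw [if_pos rfl]
      split_ifs <;> omega
    · rw [if_neg hij]
      exact hsign xi (p.getD j 0)
  rw [hmap]
  rw [map_getD_range p 0 (fun q => (if xi < q then (1 : Int) else 0) - (if xi > q then 1 else 0))]
  rfl

-- the outer loop: foldl over range k sets indices < k
def outerF (p v : List Int) (st : List Int × List Int) (i : Nat) : List Int × List Int :=
  let vxi0 := v.getD i 0
  let xi := p.getD i 0
  let vxi := (List.range p.length).foldl
    (fun vxi j =>
      if i ≠ j then vxi + (if xi > p.getD j 0 then -1 else if xi < p.getD j 0 then 1 else 0)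
      else vxi) vxi0
  (st.1.set i (xi + vxi), st.2.set i vxi)

theorem stepA_eq_fold (p v : List Int) :
    stepA p v = (List.range p.length).foldl (outerF p v) (p, v) := rfl

theorem outer_inv (p v : List Int) (hv : v.length = p.length) (k : Nat) (hk : k ≤ p.length) :
    ((List.range k).foldl (outerF p v) (p, v)).1.length = p.length ∧
    ((List.range k).foldl (outerF p v) (p, v)).2.length = p.length ∧
    (∀ i, i < p.length →
      ((List.range k).foldl (outerF p v) (p, v)).2.getD i 0
        = if i < k then v.getD i 0 + accB p (p.getD i 0) else v.getD i 0) ∧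
    (∀ i, i < p.length →
      ((List.range k).foldl (outerF p v) (p, v)).1.getD i 0
        = if i < k then p.getD i 0 + (v.getD i 0 + accB p (p.getD i 0)) else p.getD i 0) := by
  induction k with
  | zero =>
    refine ⟨by simp, by simpa using hv, ?_, ?_⟩ <;> intro i hi <;> simp
  | succ k ih =>
    obtain ⟨ih1, ih2, ih3, ih4⟩ := ih (by omega)
    rw [List.range_succ, List.foldl_append, List.foldl_cons, List.foldl_nil]
    have hvk := inner_eq p k (by omega) (v.getD k 0)
    simp only [outerF]
    refine ⟨by simp [ih1], by simp [ih2], ?_, ?_⟩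
    · intro i hi
      rw [List.getD_eq_getElem?_getD, List.getElem?_set, ih2]
      by_cases hik : k = i
      · subst hik
        rw [if_pos rfl, if_pos (by omega), hvk]
        simp only [Option.getD_some]
        rw [if_pos (by omega)]
      · rw [if_neg hik, ← List.getD_eq_getElem?_getD, ih3 i hi]
        by_cases h1 : i < k
        · rw [if_pos h1, if_pos (by omega)]
        · rw [if_neg h1, if_neg (by omega)]
    · intro i hi
      rw [List.getD_eq_getElem?_getD, List.getElem?_set, ih1]
      by_cases hik : k = i
      · subst hik
        rw [if_pos rfl, if_pos (by omega), hvk]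
        simp only [Option.getD_some]
        rw [if_pos (by omega)]
      · rw [if_neg hik, ← List.getD_eq_getElem?_getD, ih4 i hi]
        by_cases h1 : i < k
        · rw [if_pos h1, if_pos (by omega)]
        · rw [if_neg h1, if_neg (by omega)]

theorem stepA_eq_stepB (p v : List Int) (hv : v.length = p.length) :
    stepA p v = stepB p v := by
  obtain ⟨h1, h2, h3, h4⟩ := outer_inv p v hv p.length le_rfl
  have hB2 := stepB_len2 p v hv
  have hB1 := stepB_len1 p v hv
  rw [stepA_eq_fold]
  refine Prod.ext ?_ ?_
  · apply List.ext_getElem (by rw [hB1]; exact h1)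
    intro i hi hi'
    have hip : i < p.length := by omega
    have e1 : (stepB p v).1[i]'hi' = p[i]'hip + (v[i]'(by omega) + accB p (p[i]'hip)) := by
      rw [stepB_get1 p v hv i hip, stepB_get2 p v hv i hip,
        eDelta_eq_accB p _ (List.getElem_mem hip)]
    have e2 := h4 i hip
    rw [if_pos hip] at e2
    rw [List.getD_eq_getElem _ 0 hi] at e2
    rw [List.getD_eq_getElem p 0 hip, List.getD_eq_getElem v 0 (by omega)] at e2
    rw [e2, e1]
  · apply List.ext_getElem (by rw [hB2]; exact h2)
    intro i hi hi'
    have hip : i < p.length := by omega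
    have e1 : (stepB p v).2[i]'hi' = v[i]'(by omega) + accB p (p[i]'hip) := by
      rw [stepB_get2 p v hv i hip, eDelta_eq_accB p _ (List.getElem_mem hip)]
    have e2 := h3 i hip
    rw [if_pos hip] at e2
    rw [List.getD_eq_getElem _ 0 hi] at e2
    rw [List.getD_eq_getElem p 0 hip, List.getD_eq_getElem v 0 (by omega)] at e2
    rw [e2, e1]

theorem stepA_orbit (xs : List Int) (k : Nat) :
    stepA (orbit xs k).1 (orbit xs k).2 = orbit xs (k + 1) := by
  have hg := orbit_good xs k
  rw [stepA_eq_stepB _ _ hg]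
  rw [show orbit xs (k + 1) = step1 (orbit xs k) from by
    simp [orbit, Function.iterate_succ_apply']]
  rfl

theorem stepB_orbit (xs : List Int) (k : Nat) :
    stepB (orbit xs k).1 (orbit xs k).2 = orbit xs (k + 1) := by
  rw [show orbit xs (k + 1) = step1 (orbit xs k) from by
    simp [orbit, Function.iterate_succ_apply']]
  rfl

-- Floyd's condition coincides with "back at the start": orbit k = orbit (2k) ↔ orbit k = orbit 0
theorem floyd_cond (xs : List Int) (k : Nat) :
    orbit xs k = orbit xs (2 * k) ↔ orbit xs k = orbit xs 0 := by
  constructor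
  · intro h
    have h0 := repeat_to_zero xs k (2 * k) (by omega) h
    rw [show 2 * k - k = k from by omega] at h0
    exact h0.symm
  · intro h
    have h2 := orbit_shift xs k (2 * k) (by omega)
    rw [show 2 * k - k = k from by omega] at h2
    have h3 := orbit_shift xs k k le_rfl
    rw [Nat.sub_self] at h3
    calc orbit xs k = step1^[k] (orbit xs 0) := h3
      _ = step1^[k] (orbit xs k) := by rw [← h]
      _ = orbit xs (2 * k) := h2.symm

-- the synced loop lemma: for every fuel, A's set-search at step k equals Floyd at step k
theorem loop_eq (xs : List Int) : ∀ (f k : Nat) (seen : Std.HashSet (List Int × List Int)),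
    1 ≤ k →
    (∀ st, st ∈ seen ↔ ∃ j, j < k ∧ orbit xs j = st) →
    (∀ i, 0 < i → i < k → orbit xs i ≠ orbit xs 0) →
    loopA f (orbit xs k) seen (k : Int) = loopB f (orbit xs k) (orbit xs (2 * k)) (k : Int) := by
  intro f
  induction f with
  | zero => intro k seen _ _ _; rfl
  | succ f ih =>
    intro k seen hk1 hchar hnostop
    have hmemiff : orbit xs k ∈ seen ↔ orbit xs k = orbit xs 0 := by
      constructor
      · intro hm
        obtain ⟨j, hj, hje⟩ := (hchar (orbit xs k)).mp hm
        have h0 := repeat_to_zero xs j k (by omega) hje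
        by_cases hj0 : j = 0
        · subst hj0; simpa using h0.symm
        · exact absurd h0.symm (hnostop (k - j) (by omega) (by omega))
      · intro he
        exact (hchar (orbit xs k)).mpr ⟨0, by omega, he.symm⟩
    rw [loopA, loopB]
    by_cases hstop : orbit xs k = orbit xs 0
    · rw [if_pos (hmemiff.mpr hstop), if_pos ((floyd_cond xs k).mpr hstop)]
    · rw [if_neg (fun hm => hstop (hmemiff.mp hm)),
        if_neg (fun he => hstop ((floyd_cond xs k).mp he))]
      simp only [stepA_orbit, stepB_orbit]
      have hhare : orbit xs (2 * k + 1 + 1) = orbit xs (2 * (k + 1)) := by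
        congr 1
      rw [hhare]
      have hchar' : ∀ st, st ∈ seen.insert (orbit xs k) ↔
          ∃ j, j < k + 1 ∧ orbit xs j = st := by
        intro st
        simp only [Std.HashSet.mem_insert, beq_iff_eq]
        constructor
        · rintro (h | h)
          · exact ⟨k, by omega, h⟩
          · obtain ⟨j, hj, hje⟩ := (hchar st).mp h
            exact ⟨j, by omega, hje⟩
        · rintro ⟨j, hj, hje⟩
          by_cases hjk : j = k
          · subst hjk; left; exact hje
          · right; exact (hchar st).mpr ⟨j, by omega, hje⟩
      have hnostop' : ∀ i, 0 < i → i < k + 1 → orbit xs i ≠ orbit xs 0 := by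
        intro i h0 hk1'
        by_cases hik : i = k
        · subst hik; exact hstop
        · exact hnostop i h0 (by omega)
      have := ih (k + 1) (seen.insert (orbit xs k)) (by omega) hchar' hnostop'
      push_cast at this ⊢
      exact this

-- ===== VERDICT (by name: the statement is the Claim_ definition above) =====
theorem find_repetition_dimension_spec : Claim_equal_find_repetition_dimension := by
  intro xs _
  unfold Spec_find_repetition_dimension find_repetition_dimension find_repetition_dimension_alt
  show loopA 4294967296 (xs, xs.map (fun _ => (0 : Int))) Std.HashSet.emptyWithCapacity 0
      = loopB 4294967295 (stepB xs (xs.map (fun _ => (0 : Int))))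
          (stepB (stepB xs (xs.map (fun _ => (0 : Int)))).1
                 (stepB xs (xs.map (fun _ => (0 : Int)))).2) 1
  have ht : stepB xs (xs.map (fun _ => (0 : Int))) = orbit xs 1 := stepB_orbit xs 0
  have e0 : (xs, xs.map (fun _ => (0 : Int))) = orbit xs 0 := rfl
  rw [ht, stepB_orbit xs 1, e0]
  have h0 : loopA 4294967296 (orbit xs 0) Std.HashSet.emptyWithCapacity 0
      = loopA 4294967295 (orbit xs 1) (Std.HashSet.emptyWithCapacity.insert (orbit xs 0)) 1 := by
    rw [show (4294967296 : Nat) = 4294967295 + 1 from rfl, loopA, if_neg (by simp)]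
    rw [stepA_orbit]
    norm_num
  have h := loop_eq xs 4294967295 1 (Std.HashSet.emptyWithCapacity.insert (orbit xs 0))
    (by omega)
    (by intro st
        simp only [Std.HashSet.mem_insert, Std.HashSet.not_mem_emptyWithCapacity, or_false,
          beq_iff_eq]
        constructor
        · intro he; exact ⟨0, by omega, he⟩
        · rintro ⟨j, hj, hje⟩; rw [show j = 0 from by omega] at hje; exact hje)
    (by intro i hpos hk; omega)
  rw [h0]
  simpa using h
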